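-- pv_equiv track=rewrite | github.com/mhems/aoc | 2021/day15/a.py | make_giant_grid
-- ===== SOURCE A (Python) =====
-- from functools import reduce
--
-- def make_giant_grid(tile: [[int]], n: int = 5) -> [[int]]:
--     tiles = [[None] * n for _ in range(n)]
--     tiles[0][0] = tile
--     def increment(cell: int, distance: int) -> int:
--         cell += distance
--         if cell > 9:
--             cell = (cell % 10) + 1
--         return cell
--     for r in range(n):
--         for c in range(n):
--             if r == 0 and c == 0:
--                 continue
--             tiles[r][c] = [[increment(cell, r + c) for cell in row] for row in tile]
--     def stitch(lists) -> [int]: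
--         return reduce(lambda l1, l2: l1 + l2, lists)
--     new_grid = []
--     for row in tiles:
--         for inner_y in range(len(row[0])):
--             new_grid.append(stitch(row[i][inner_y] for i in range(n)))
--     return new_grid
-- ===== SOURCE B (Python) =====
-- def make_giant_grid(tile: [[int]], n: int = 5) -> [[int]]:
--     # Fused single-pass construction: no intermediate n x n tiles matrix, no reduce stitch.
--     def shift(v: int, d: int) -> int:
--         if d == 0:
--             return v
--         v += d
--         return (v % 10) + 1 if v > 9 else v
--     return [[shift(v, r + c) for c in range(n) for v in row]
--             for r in range(n) for row in tile]
-- ===== Notes on version B (the rewrite author's own statement) =====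
-- stated objective: simpler
-- what changed: Drops the intermediate n-by-n tiles matrix and the reduce-based stitching pass; each output row is built directly in one fused comprehension over (r, tile row, c, cell).
import Mathlib
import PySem

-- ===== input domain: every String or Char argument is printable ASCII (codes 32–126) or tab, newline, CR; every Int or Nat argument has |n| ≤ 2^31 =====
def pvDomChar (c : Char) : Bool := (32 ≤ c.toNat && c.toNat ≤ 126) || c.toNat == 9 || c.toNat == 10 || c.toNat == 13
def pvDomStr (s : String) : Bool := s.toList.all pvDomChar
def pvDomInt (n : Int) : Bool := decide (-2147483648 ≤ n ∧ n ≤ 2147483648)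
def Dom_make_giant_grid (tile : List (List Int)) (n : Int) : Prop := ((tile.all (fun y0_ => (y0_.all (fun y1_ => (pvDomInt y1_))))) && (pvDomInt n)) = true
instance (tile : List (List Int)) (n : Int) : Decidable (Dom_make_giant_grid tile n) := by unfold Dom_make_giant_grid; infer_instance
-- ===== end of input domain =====

-- B replaces A's two-phase tiles-matrix-then-stitch construction by one fused direct
-- row construction (objective: simpler).

-- ===== PORT A =====
def pvIncA (cell distance : Int) : Int :=
  let cell := cell + distance
  if cell > 9 then (PySem.Int.mod cell 10) + 1 else cell

-- reduce(lambda l1, l2: l1 + l2, lists); raises on [], unreachable under Pre_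
def pvStitch (lists : List (List Int)) : List Int :=
  match lists with
  | [] => []
  | h :: t => t.foldl (· ++ ·) h

def make_giant_grid (tile : List (List Int)) (n : Int) : List (List Int) :=
  let tiles : List (List (List (List Int))) :=
    (PySem.List.pyRange 0 n 1).map (fun r =>
      (PySem.List.pyRange 0 n 1).map (fun c =>
        if r = 0 ∧ c = 0 then tile
        else tile.map (fun row => row.map (fun cell => pvIncA cell (r + c)))))
  tiles.foldl (fun acc row =>
    (PySem.List.pyRange 0 ((PySem.List.pyGetD row 0 []).length : Int) 1).foldl
      (fun acc2 y =>
        acc2 ++ [pvStitch ((PySem.List.pyRange 0 n 1).map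
          (fun i => PySem.List.pyGetD (PySem.List.pyGetD row i []) y []))]) acc) []

-- ===== PORT B =====
def pvShift (v d : Int) : Int :=
  if d = 0 then v
  else
    let v := v + d
    if v > 9 then (PySem.Int.mod v 10) + 1 else v

def make_giant_grid_alt (tile : List (List Int)) (n : Int) : List (List Int) :=
  (PySem.List.pyRange 0 n 1).flatMap (fun r =>
    tile.map (fun row =>
      (PySem.List.pyRange 0 n 1).flatMap (fun c =>
        row.map (fun v => pvShift v (r + c)))))

-- ===== PRECONDITION & SPEC =====
-- A raises IndexError on tiles[0][0] when n ≤ 0 (and reduce would raise on an empty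
-- generator); Pre_ keeps exactly the inputs where A returns.
def Pre_make_giant_grid (tile : List (List Int)) (n : Int) : Prop := 1 ≤ n
instance (tile : List (List Int)) (n : Int) : Decidable (Pre_make_giant_grid tile n) := by
  unfold Pre_make_giant_grid; infer_instance

def pvWitness_make_giant_grid : List (List Int) × Int := ([[1, 8], [9, 2]], 2)

def Spec_make_giant_grid (tile : List (List Int)) (n : Int) (out : List (List Int)) : Prop :=
  out = make_giant_grid_alt tile n
instance (tile : List (List Int)) (n : Int) (out : List (List Int)) : Decidable (Spec_make_giant_grid tile n out) := by
  unfold Spec_make_giant_grid; infer_instance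

-- ===== CLAIM (what is proved, stated in full; the proofs are below) =====
def Claim_equal_make_giant_grid : Prop := ∀ (tile : List (List Int)) (n : Int), Dom_make_giant_grid tile n → Pre_make_giant_grid tile n → Spec_make_giant_grid tile n (make_giant_grid tile n)

-- ===== LEMMAS AND PROOFS =====

lemma foldl_append_flatten (t : List (List Int)) (h : List Int) :
    t.foldl (· ++ ·) h = h ++ t.flatten := by
  induction t generalizing h with
  | nil => simp
  | cons x xs ih => simp [List.foldl_cons, ih, List.append_assoc]

lemma pvStitch_eq_flatten (l : List (List Int)) (h : l ≠ []) :
    pvStitch l = l.flatten := by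
  cases l with
  | nil => exact absurd rfl h
  | cons x xs => simp [pvStitch, foldl_append_flatten]

lemma blk_eq (tile : List (List Int)) (r c : Int) (hr : 0 ≤ r) (hc : 0 ≤ c) :
    (if r = 0 ∧ c = 0 then tile
     else tile.map (fun row => row.map (fun cell => pvIncA cell (r + c))))
    = tile.map (fun row => row.map (fun v => pvShift v (r + c))) := by
  by_cases h : r = 0 ∧ c = 0
  · obtain ⟨h1, h2⟩ := h
    subst h1; subst h2
    simp [pvShift]
  · rw [if_neg h]
    have hd : r + c ≠ 0 := by omega
    simp [pvIncA, pvShift, hd]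

lemma blk_length (tile : List (List Int)) (r c : Int) :
    (if r = 0 ∧ c = 0 then tile
     else tile.map (fun row => row.map (fun cell => pvIncA cell (r + c)))).length
    = tile.length := by
  split <;> simp


lemma pvR_nonempty (n : Int) (hn : 1 ≤ n) : PySem.List.pyRange 0 n 1 ≠ [] := by
  rw [PySem.List.pyRange_one_cons (by omega)]; simp

theorem make_giant_grid_spec : Claim_equal_make_giant_grid := by
  intro tile n _ hn
  unfold Pre_make_giant_grid at hn
  unfold Spec_make_giant_grid make_giant_grid make_giant_grid_alt
  simp only [PySem.List.foldl_append_singleton_eq_map, PySem.List.foldl_append_eq_flatMap,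
    List.flatMap_map, List.nil_append]
  apply List.flatMap_congr
  intro r hr
  obtain ⟨hr0, hrn⟩ := (PySem.List.mem_pyRange_one).mp hr
  rw [PySem.List.pyGetD_map_pyRange_of_nonneg _ n 0 [] le_rfl (by omega)]
  rw [blk_length]
  conv_rhs => rw [← PySem.List.map_pyGetD_pyRange_zero' tile ([] : List Int), List.map_map]
  apply List.map_congr_left
  intro y hy
  obtain ⟨hy0, hyl⟩ := (PySem.List.mem_pyRange_one).mp hy
  have hlist : (PySem.List.pyRange 0 n 1).map (fun i =>
      PySem.List.pyGetD (PySem.List.pyGetD ((PySem.List.pyRange 0 n 1).map (fun c =>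
        if r = 0 ∧ c = 0 then tile
        else tile.map fun row => row.map fun cell => pvIncA cell (r + c))) i []) y [])
      = (PySem.List.pyRange 0 n 1).map (fun c =>
          (PySem.List.pyGetD tile y []).map (fun v => pvShift v (r + c))) := by
    apply List.map_congr_left
    intro i hi
    obtain ⟨hi0, hin⟩ := (PySem.List.mem_pyRange_one).mp hi
    rw [PySem.List.pyGetD_map_pyRange_of_nonneg _ n i [] hi0 hin]
    rw [blk_eq tile r i hr0 hi0]
    rw [PySem.List.pyGetD_eq_getElem _ ([] : List Int) hy0 (by simpa using hyl),
        PySem.List.pyGetD_eq_getElem tile ([] : List Int) hy0 hyl]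
    simp
  rw [hlist, pvStitch_eq_flatten _ (by
        intro h
        exact pvR_nonempty n hn (List.map_eq_nil_iff.mp h))]
  simp [List.flatMap]
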